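-- pv_equiv track=rewrite | github.com/TELY01-DEV/evep-my-firstcare-com | test_fifo_field_management_demo.py | simulate_intelligent_merge
-- ===== SOURCE A (Python) =====
-- from typing import Dict, List, Any
--
-- def simulate_intelligent_merge(changes: List[Dict[str, Any]]) -> str:
--     """Simulate intelligent text merging"""
--
--     # Simple merge logic - in reality this would be much more sophisticated
--     all_words = set()
--     final_parts = []
--
--     for change in changes:
--         value = change['value']
--
--         # Extract unique medical information
--         if 'diabetes diagnosed 2020' in value:
--             if 'diabetes diagnosed 2020' not in ' '.join(final_parts):
--                 final_parts.append('diabetes diagnosed 2020')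
--
--         if 'hypertension since 2019' in value:
--             if 'hypertension since 2019' not in ' '.join(final_parts):
--                 final_parts.append('hypertension since 2019')
--
--         if 'well controlled with medication' in value:
--             if 'well controlled with medication' not in ' '.join(final_parts):
--                 final_parts.append('well controlled with medication')
--
--     if final_parts:
--         return f'Patient has {", ".join(final_parts)}'
--     else:
--         return changes[-1]['value']  # Fallback to last change
-- ===== SOURCE B (Python) =====
-- PHRASES = [
--     'diabetes diagnosed 2020',
--     'hypertension since 2019',
--     'well controlled with medication',
-- ]
--
--
-- def simulate_intelligent_merge(changes):
--     """Phrase-major staged rewrite: extract all values first; then, per target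
--     phrase, search for the first value containing it (break on hit); finally sort
--     the (index, priority, phrase) hits and join their phrases."""
--     values = [change['value'] for change in changes]
--     hits = []
--     for prio, phrase in enumerate(PHRASES):
--         for i, v in enumerate(values):
--             if phrase in v:
--                 hits.append((i, prio, phrase))
--                 break
--     hits.sort(key=lambda t: (t[0], t[1]))
--     if hits:
--         return 'Patient has ' + ', '.join(t[2] for t in hits)
--     return values[-1]
-- ===== Notes on version B (the rewrite author's own statement) =====
-- stated objective: alternative
-- what changed: Transposes the loop nest: instead of A's change-major scan that appends phrases with a join-and-substring dedup, B is phrase-major and staged — it extracts all values, then for each of the three phrases searches (with break) for the first value containing it, and finally sorts the (index, priority, phrase) hits and joins them.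
import Mathlib
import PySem

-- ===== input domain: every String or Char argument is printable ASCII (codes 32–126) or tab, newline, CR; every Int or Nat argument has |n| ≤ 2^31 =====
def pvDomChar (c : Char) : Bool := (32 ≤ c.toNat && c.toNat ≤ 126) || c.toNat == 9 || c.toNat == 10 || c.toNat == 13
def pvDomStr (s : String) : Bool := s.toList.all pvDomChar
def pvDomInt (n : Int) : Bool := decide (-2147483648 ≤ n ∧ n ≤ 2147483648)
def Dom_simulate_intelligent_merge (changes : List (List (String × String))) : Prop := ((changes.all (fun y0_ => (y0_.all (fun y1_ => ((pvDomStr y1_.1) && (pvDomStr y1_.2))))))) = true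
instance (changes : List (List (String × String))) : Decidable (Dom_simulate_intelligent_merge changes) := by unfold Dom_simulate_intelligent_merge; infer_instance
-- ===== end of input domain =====

-- B transposes A's loop nest: instead of a change-major scan appending phrases with a
-- join-and-substring dedup, B extracts all values, searches per phrase for its first
-- containing value (break on hit), then sorts the (index, priority, phrase) hits and
-- joins them; objective: alternative decomposition (not faster).

def pvP0 : String := "diabetes diagnosed 2020"
def pvP1 : String := "hypertension since 2019"
def pvP2 : String := "well controlled with medication"

-- ===== PORT A =====
def aStep (fp : List String) (change : List (String × String)) : List String :=
  let value := (PySem.Dict.mk change).getD "value" ""   -- change['value'] (KeyError excluded by Pre_)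
  let fp := if PySem.Str.isIn pvP0 value then
      (if PySem.Str.isIn pvP0 (PySem.Str.join " " fp) then fp else fp ++ [pvP0]) else fp
  let fp := if PySem.Str.isIn pvP1 value then
      (if PySem.Str.isIn pvP1 (PySem.Str.join " " fp) then fp else fp ++ [pvP1]) else fp
  let fp := if PySem.Str.isIn pvP2 value then
      (if PySem.Str.isIn pvP2 (PySem.Str.join " " fp) then fp else fp ++ [pvP2]) else fp
  fp

def simulate_intelligent_merge (changes : List (List (String × String))) : String :=
  let final_parts := changes.foldl aStep []
  if final_parts ≠ [] then "Patient has " ++ PySem.Str.join ", " final_parts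
  else (PySem.Dict.mk ((PySem.List.pyGet? changes (-1)).getD [])).getD "value" ""  -- changes[-1]['value'] (IndexError excluded by Pre_)

-- ===== PORT B =====
def pvPHRASES : List String := [pvP0, pvP1, pvP2]

-- the inner 'for i, v in enumerate(values): if phrase in v: …; break' search
def bFind : List (Int × String) → String → Option Int
  | [], _ => none
  | iv :: rest, phrase => if PySem.Str.isIn phrase iv.2 then some iv.1 else bFind rest phrase

def bHitsStep (values : List String) (hs : List (Int × Int × String)) (jp : Int × String) :
    List (Int × Int × String) :=
  match bFind (PySem.List.enumerate values) jp.2 with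
  | some i => hs ++ [(i, jp.1, jp.2)]
  | none => hs

def simulate_intelligent_merge_alt (changes : List (List (String × String))) : String :=
  let values := changes.map (fun change => (PySem.Dict.mk change).getD "value" "")  -- change['value'] (KeyError excluded by Pre_)
  let hits := (PySem.List.enumerate pvPHRASES).foldl (bHitsStep values) []
  let hits := PySem.List.sorted2 hits (fun t => t.1) (fun t => t.2.1)
  if hits ≠ [] then "Patient has " ++ PySem.Str.join ", " (hits.map (fun t => t.2.2))
  else (PySem.List.pyGet? values (-1)).getD ""  -- values[-1] (IndexError excluded by Pre_)

-- ===== PRECONDITION & SPEC =====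
-- Pre_ excludes exactly the inputs on which Python A raises: the empty list (IndexError on
-- changes[-1]) and any change without a 'value' key (KeyError).
def Pre_simulate_intelligent_merge (changes : List (List (String × String))) : Prop :=
  changes ≠ [] ∧ ∀ c ∈ changes, (PySem.Dict.mk c).contains "value" = true
instance (changes : List (List (String × String))) : Decidable (Pre_simulate_intelligent_merge changes) := by unfold Pre_simulate_intelligent_merge; infer_instance
def pvWitness_simulate_intelligent_merge : (List (List (String × String))) := [[("value", "diabetes diagnosed 2020")]]

def Spec_simulate_intelligent_merge (changes : List (List (String × String))) (out : String) : Prop := out = simulate_intelligent_merge_alt changes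
instance (changes : List (List (String × String))) (out : String) : Decidable (Spec_simulate_intelligent_merge changes out) := by unfold Spec_simulate_intelligent_merge; infer_instance

-- ===== CLAIM (what is proved, stated in full; the proofs are below) =====
def Claim_equal_simulate_intelligent_merge : Prop := ∀ (changes : List (List (String × String))), Dom_simulate_intelligent_merge changes → Pre_simulate_intelligent_merge changes → Spec_simulate_intelligent_merge changes (simulate_intelligent_merge changes)

-- ===== LEMMAS AND PROOFS =====

-- All 16 lists of distinct phrases; A's accumulator always is one of them.
def pvStates : List (List String) :=
  [[], [pvP0], [pvP1], [pvP2],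
   [pvP0, pvP1], [pvP0, pvP2], [pvP1, pvP0], [pvP1, pvP2], [pvP2, pvP0], [pvP2, pvP1],
   [pvP0, pvP1, pvP2], [pvP0, pvP2, pvP1], [pvP1, pvP0, pvP2],
   [pvP1, pvP2, pvP0], [pvP2, pvP0, pvP1], [pvP2, pvP1, pvP0]]

-- one conditional phrase addition, A-side membership form
def mAdd (fp : List String) (p : String) (cond : Bool) : List String :=
  if cond then (if p ∈ fp then fp else fp ++ [p]) else fp

-- A's step expressed on the extracted value
def aStep2 (fp : List String) (v : String) : List String :=
  mAdd (mAdd (mAdd fp pvP0 (PySem.Str.isIn pvP0 v)) pvP1 (PySem.Str.isIn pvP1 v)) pvP2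
    (PySem.Str.isIn pvP2 v)

def pvVal (change : List (String × String)) : String := (PySem.Dict.mk change).getD "value" ""

-- first index of a value containing p
def fIdx (p : String) (vs : List String) : Option Nat :=
  vs.findIdx? (fun v => PySem.Str.isIn p v)

def pvPrio (p : String) : Int := if p = pvP0 then 0 else if p = pvP1 then 1 else 2

def keyOf (vs : List String) (p : String) : Int × Int × String :=
  (((fIdx p vs).getD 0 : Nat), pvPrio p, p)

def hitOf (vs : List String) (j : Int) (p : String) : List (Int × Int × String) :=
  match fIdx p vs with
  | some n => [((n : Int), j, p)]
  | none => []

def Tle (a b : Int × Int × String) : Prop := a.1 < b.1 ∨ (a.1 = b.1 ∧ a.2.1 ≤ b.2.1)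
def Tlt (a b : Int × Int × String) : Prop := a.1 < b.1 ∨ (a.1 = b.1 ∧ a.2.1 < b.2.1)

def tBefore (a b : Int × Int × String) : Bool :=
  decide (a.1 < b.1) || (!decide (b.1 < a.1) && decide (a.2.1 < b.2.1))

lemma joinMem (fp : List String) (hfp : fp ∈ pvStates) (p : String) (hp : p ∈ pvPHRASES) :
    PySem.Str.isIn p (PySem.Str.join " " fp) = decide (p ∈ fp) := by
  fin_cases hfp <;> fin_cases hp <;> decide

lemma mAdd_mem (fp : List String) (hfp : fp ∈ pvStates) (p : String) (hp : p ∈ pvPHRASES)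
    (c : Bool) : mAdd fp p c ∈ pvStates := by
  unfold mAdd; cases c <;> fin_cases hfp <;> fin_cases hp <;> simp <;> decide

lemma aAdd_eq (fp : List String) (hfp : fp ∈ pvStates) (p : String) (hp : p ∈ pvPHRASES)
    (c : Bool) :
    (if c then (if PySem.Str.isIn p (PySem.Str.join " " fp) then fp else fp ++ [p]) else fp)
      = mAdd fp p c := by
  unfold mAdd
  rw [joinMem fp hfp p hp]
  by_cases h : p ∈ fp <;> simp [h]

lemma aStep_eq_aStep2 (fp : List String) (hfp : fp ∈ pvStates) (c : List (String × String)) :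
    aStep fp c = aStep2 fp (pvVal c) := by
  have h0 : pvP0 ∈ pvPHRASES := by decide
  have h1 : pvP1 ∈ pvPHRASES := by decide
  have h2 : pvP2 ∈ pvPHRASES := by decide
  simp only [aStep, aStep2, pvVal]
  rw [aAdd_eq fp hfp pvP0 h0,
      aAdd_eq _ (mAdd_mem fp hfp pvP0 h0 _) pvP1 h1,
      aAdd_eq _ (mAdd_mem _ (mAdd_mem fp hfp pvP0 h0 _) pvP1 h1 _) pvP2 h2]

lemma aStep2_mem (fp : List String) (hfp : fp ∈ pvStates) (v : String) :
    aStep2 fp v ∈ pvStates :=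
  mAdd_mem _ (mAdd_mem _ (mAdd_mem fp hfp pvP0 (by decide) _) pvP1 (by decide) _) pvP2
    (by decide) _

-- A's fold over changes is the fold of aStep2 over the extracted values
lemma foldl_aStep_eq : ∀ (changes : List (List (String × String))) (fp : List String),
    fp ∈ pvStates → changes.foldl aStep fp = (changes.map pvVal).foldl aStep2 fp := by
  intro changes
  induction changes with
  | nil => intro fp _; rfl
  | cons c cs ih =>
    intro fp hfp
    simp only [List.foldl_cons, List.map_cons]
    rw [aStep_eq_aStep2 fp hfp c, ih _ (aStep2_mem fp hfp _)]

-- mAdd as an append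
lemma mAdd_eq_append (fp : List String) (p : String) (c : Bool) :
    mAdd fp p c = fp ++ (if c = true ∧ p ∉ fp then [p] else []) := by
  unfold mAdd; cases c <;> by_cases h : p ∈ fp <;> simp [h]

lemma mem_append_if (q p : String) (hne : q ≠ p) (fp : List String) (c : Prop) [Decidable c] :
    (q ∈ fp ++ (if c then [p] else [])) ↔ q ∈ fp := by
  split <;> simp [hne]

lemma mem_append_if2 (q p p' : String) (hne : q ≠ p) (hne' : q ≠ p') (fp : List String)
    (c c' : Prop) [Decidable c] [Decidable c'] :
    (q ∈ fp ++ ((if c then [p] else []) ++ (if c' then [p'] else []))) ↔ q ∈ fp := by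
  split <;> split <;> simp [hne, hne']

-- the chain of three mAdds as one append
lemma aStep2_eq_append (fp : List String) (v : String) :
    aStep2 fp v = fp ++
      ((if PySem.Str.isIn pvP0 v = true ∧ pvP0 ∉ fp then [pvP0] else []) ++
       (if PySem.Str.isIn pvP1 v = true ∧ pvP1 ∉ fp then [pvP1] else []) ++
       (if PySem.Str.isIn pvP2 v = true ∧ pvP2 ∉ fp then [pvP2] else [])) := by
  have d10 : pvP1 ≠ pvP0 := by decide
  have d20 : pvP2 ≠ pvP0 := by decide
  have d21 : pvP2 ≠ pvP1 := by decide
  simp only [aStep2, mAdd_eq_append, mem_append_if _ _ d10,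
    mem_append_if2 _ _ _ d20 d21, List.append_assoc]

-- fIdx structural lemmas
lemma fIdx_cons (p v : String) (vs : List String) :
    fIdx p (v :: vs) = if PySem.Str.isIn p v then some 0 else (fIdx p vs).map (· + 1) := by
  unfold fIdx; rw [List.findIdx?_cons]

lemma fIdx_append (p : String) (vs : List String) (v : String) :
    fIdx p (vs ++ [v]) =
      (fIdx p vs).or (if PySem.Str.isIn p v then some vs.length else none) := by
  unfold fIdx
  rw [List.findIdx?_append, List.findIdx?_cons, List.findIdx?_nil]
  cases h : PySem.Chars.isIn p.toList v.toList <;> simp [PySem.Str.isIn_eq, h]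

lemma fIdx_lt (p : String) (vs : List String) (n : Nat) (h : fIdx p vs = some n) :
    n < vs.length := by
  unfold fIdx at h
  exact (List.findIdx?_eq_some_iff_findIdx_eq.mp h).1

-- B's inner search in terms of fIdx
lemma bFind_enumerate (p : String) : ∀ (vs : List String) (s : Int),
    bFind (PySem.List.enumerate vs s) p = (fIdx p vs).map (fun n => s + (n : Int)) := by
  intro vs
  induction vs with
  | nil => intro s; simp [PySem.List.enumerate_nil, bFind, fIdx]
  | cons v vs ih =>
    intro s
    rw [PySem.List.enumerate_cons, fIdx_cons]
    simp only [bFind]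
    cases h : PySem.Str.isIn p v <;> simp [h, ih (s + 1)]
    · cases hf : fIdx p vs <;> simp <;> push_cast <;> ring

-- B's hits fold in closed form
lemma bHits_eq (vs : List String) :
    (PySem.List.enumerate pvPHRASES).foldl (bHitsStep vs) [] =
      hitOf vs 0 pvP0 ++ hitOf vs 1 pvP1 ++ hitOf vs 2 pvP2 := by
  have he : PySem.List.enumerate pvPHRASES = [(0, pvP0), (1, pvP1), (2, pvP2)] := by
    simp [pvPHRASES, PySem.List.enumerate_cons, PySem.List.enumerate_nil]
  rw [he]
  simp only [List.foldl_cons, List.foldl_nil, bHitsStep, bFind_enumerate]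
  rcases h0 : fIdx pvP0 vs with _ | n0 <;> rcases h1 : fIdx pvP1 vs with _ | n1 <;>
    rcases h2 : fIdx pvP2 vs with _ | n2 <;> simp [hitOf, h0, h1, h2]

-- ===== generic insertion-sort lemmas for sorted2 =====

lemma tBefore_iff (a b : Int × Int × String) : tBefore a b = true ↔ Tlt a b := by
  unfold tBefore Tlt; simp; omega

lemma tBefore_false (a b : Int × Int × String) (h : tBefore a b = false) : Tle b a := by
  unfold tBefore at h; unfold Tle; simp at h; omega

lemma insertBy_pairwise (x : Int × Int × String) (ys : List (Int × Int × String))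
    (h : ys.Pairwise Tle) : (PySem.List.insertBy tBefore x ys).Pairwise Tle := by
  induction ys with
  | nil => simp [PySem.List.insertBy]
  | cons y ys ih =>
    rw [List.pairwise_cons] at h
    obtain ⟨hy, hys⟩ := h
    simp only [PySem.List.insertBy]
    cases hb : tBefore x y with
    | true =>
      have hxy : Tlt x y := (tBefore_iff x y).mp hb
      simp only [hb, if_pos]
      refine List.pairwise_cons.mpr ⟨?_, List.pairwise_cons.mpr ⟨hy, hys⟩⟩
      intro z hz
      rcases List.mem_cons.mp hz with rfl | hz
      · unfold Tle; unfold Tlt at hxy; omega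
      · have := hy z hz; unfold Tle at *; unfold Tlt at hxy; omega
    | false =>
      simp only [hb, Bool.false_eq_true, if_false]
      refine List.pairwise_cons.mpr ⟨?_, ih hys⟩
      intro z hz
      rcases (PySem.List.mem_insertBy tBefore _ z ys).mp hz with h | hz
      · subst h; exact tBefore_false _ y hb
      · exact hy z hz

lemma sorted2_eq_foldl (xs : List (Int × Int × String)) :
    PySem.List.sorted2 xs (fun t => t.1) (fun t => t.2.1) =
      xs.foldl (fun acc x => PySem.List.insertBy tBefore x acc) [] := rfl

lemma foldl_insertBy_pairwise (xs acc : List (Int × Int × String)) (h : acc.Pairwise Tle) :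
    (xs.foldl (fun acc x => PySem.List.insertBy tBefore x acc) acc).Pairwise Tle := by
  induction xs generalizing acc with
  | nil => exact h
  | cons x xs ih => exact ih _ (insertBy_pairwise x acc h)

lemma sorted2_pairwise_Tle (xs : List (Int × Int × String)) :
    (PySem.List.sorted2 xs (fun t => t.1) (fun t => t.2.1)).Pairwise Tle := by
  rw [sorted2_eq_foldl]; exact foldl_insertBy_pairwise xs [] (by simp)

lemma eq_of_perm_sorted : ∀ (l₂ l₁ : List (Int × Int × String)), l₁.Perm l₂ →
    l₁.Pairwise Tle → l₂.Pairwise Tlt → l₁ = l₂ := by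
  intro l₂
  induction l₂ with
  | nil => intro l₁ hp _ _; exact hp.eq_nil
  | cons b t₂ ih =>
    intro l₁ hp h1 h2
    cases l₁ with
    | nil => exact absurd hp.symm.eq_nil (by simp)
    | cons a t₁ =>
      rw [List.pairwise_cons] at h1 h2
      by_cases hab : a = b
      · subst hab
        rw [ih t₁ hp.cons_inv h1.2 h2.2]
      · exfalso
        have ha2 : a ∈ b :: t₂ := hp.mem_iff.mp (by simp)
        have hat2 : a ∈ t₂ := by
          rcases List.mem_cons.mp ha2 with h | h
          · exact absurd h hab
          · exact h
        have hb1 : b ∈ a :: t₁ := hp.mem_iff.mpr (by simp)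
        have hbt1 : b ∈ t₁ := by
          rcases List.mem_cons.mp hb1 with h | h
          · exact absurd h.symm hab
          · exact h
        have hle := h1.1 b hbt1
        have hlt := h2.1 a hat2
        unfold Tle at hle; unfold Tlt at hlt; omega

lemma sorted2_eq_of_perm_of_pairwise (xs ys : List (Int × Int × String))
    (hperm : ys.Perm xs) (hsorted : ys.Pairwise Tlt) :
    PySem.List.sorted2 xs (fun t => t.1) (fun t => t.2.1) = ys :=
  eq_of_perm_sorted ys _ ((PySem.List.sorted2_perm _ _ _ _).trans hperm.symm)
    (sorted2_pairwise_Tle xs) hsorted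

-- ===== the main invariant =====

set_option maxHeartbeats 2000000 in
lemma main_inv (vs : List String) :
    (∀ p ∈ vs.foldl aStep2 [], p ∈ pvPHRASES ∧ (fIdx p vs).isSome = true) ∧
    (∀ p ∈ pvPHRASES, (fIdx p vs).isSome = true → p ∈ vs.foldl aStep2 []) ∧
    ((vs.foldl aStep2 []).map (keyOf vs)).Pairwise Tlt ∧
    (hitOf vs 0 pvP0 ++ hitOf vs 1 pvP1 ++ hitOf vs 2 pvP2).Perm
      ((vs.foldl aStep2 []).map (keyOf vs)) := by
  induction vs using List.reverseRecOn with
  | nil => refine ⟨by simp, ?_, by simp, by simp [hitOf, fIdx]⟩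
           intro p _ h; simp [fIdx] at h
  | append_singleton vs v ih =>
    obtain ⟨ih1, ih2, ih3, ih4⟩ := ih
    set F := vs.foldl aStep2 [] with hFdef
    have hF' : (vs ++ [v]).foldl aStep2 [] = aStep2 F v := by
      rw [List.foldl_append, List.foldl_cons, List.foldl_nil]
    have hstable : ∀ p ∈ F, fIdx p (vs ++ [v]) = fIdx p vs := by
      intro p hp
      have hs := (ih1 p hp).2
      rw [fIdx_append]
      cases hx : fIdx p vs
      · rw [hx] at hs; simp at hs
      · simp [hx]
    have hkey : ∀ p ∈ F, keyOf (vs ++ [v]) p = keyOf vs p := by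
      intro p hp; unfold keyOf; rw [hstable p hp]
    have hmapF : F.map (keyOf (vs ++ [v])) = F.map (keyOf vs) := List.map_congr_left hkey
    have hnone : ∀ p ∈ pvPHRASES, p ∉ F → fIdx p vs = none := by
      intro p hP hpF
      cases hx : fIdx p vs
      · rfl
      · exact absurd (ih2 p hP (by simp [hx])) hpF
    have hfnew : ∀ p ∈ pvPHRASES, p ∉ F → PySem.Str.isIn p v = true →
        fIdx p (vs ++ [v]) = some vs.length := by
      intro p hP hpF hin
      rw [PySem.Str.isIn_eq] at hin
      rw [fIdx_append, hnone p hP hpF]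
      simp [PySem.Str.isIn_eq, hin]
    have hknew : ∀ p ∈ pvPHRASES, p ∉ F → PySem.Str.isIn p v = true →
        keyOf (vs ++ [v]) p = ((vs.length : Int), pvPrio p, p) := by
      intro p hP hpF hin
      unfold keyOf
      rw [hfnew p hP hpF hin]
      rfl
    have hbound : ∀ p ∈ F, (((fIdx p vs).getD 0 : Nat) : Int) < (vs.length : Int) := by
      intro p hp
      have hs := (ih1 p hp).2
      cases hx : fIdx p vs
      · rw [hx] at hs; simp at hs
      · have h2 := fIdx_lt p vs _ hx
        simp
        exact_mod_cast h2
    have hP0 : pvP0 ∈ pvPHRASES := by decide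
    have hP1 : pvP1 ∈ pvPHRASES := by decide
    have hP2 : pvP2 ∈ pvPHRASES := by decide
    refine ⟨?_, ?_, ?_, ?_⟩
    · -- membership → phrase and found
      intro p hp
      rw [hF', aStep2_eq_append] at hp
      rcases List.mem_append.mp hp with hpF | hpE
      · refine ⟨(ih1 p hpF).1, ?_⟩
        rw [hstable p hpF]; exact (ih1 p hpF).2
      · have hsomeNew : ∀ q, PySem.Str.isIn q v = true → (fIdx q (vs ++ [v])).isSome = true := by
          intro q hin
          rw [fIdx_append]
          cases hx : fIdx q vs
          · rw [Option.none_or, if_pos hin]; rfl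
          · rfl
        rcases List.mem_append.mp hpE with hpE | hpE
        rcases List.mem_append.mp hpE with hpE | hpE
        all_goals
          split at hpE <;> simp_all
    · -- found → membership
      intro p hP hsome
      rw [hF', aStep2_eq_append]
      by_cases hpF : p ∈ F
      · exact List.mem_append_left _ hpF
      · have hn := hnone p hP hpF
        rw [fIdx_append, hn] at hsome
        by_cases hin : PySem.Str.isIn p v
        · apply List.mem_append_right
          fin_cases hP <;> simp_all
        · rw [Option.none_or, if_neg hin] at hsome
          simp at hsome
    · -- pairwise Tlt of the keys
      rw [hF', aStep2_eq_append, List.map_append, hmapF]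
      apply List.pairwise_append.mpr
      refine ⟨ih3, ?_, ?_⟩
      · -- the new block is key-sorted
        have hTlt : ∀ pa pb : String, pa ∈ pvPHRASES → pb ∈ pvPHRASES → pa ∉ F → pb ∉ F →
            PySem.Str.isIn pa v = true → PySem.Str.isIn pb v = true → pvPrio pa < pvPrio pb →
            Tlt (keyOf (vs ++ [v]) pa) (keyOf (vs ++ [v]) pb) := by
          intro pa pb hPa hPb ha hb hia hib hlt
          rw [hknew pa hPa ha hia, hknew pb hPb hb hib]
          unfold Tlt
          right
          exact ⟨rfl, hlt⟩
        have hmem_m : ∀ (pj : String) (a : Int × Int × String),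
            a ∈ (if PySem.Str.isIn pj v = true ∧ pj ∉ F then [pj] else []).map
                  (keyOf (vs ++ [v])) →
            a = keyOf (vs ++ [v]) pj ∧ PySem.Str.isIn pj v = true ∧ pj ∉ F := by
          intro pj a ha
          split at ha <;> simp_all
        have hpw_if : ∀ (pj : String),
            ((if PySem.Str.isIn pj v = true ∧ pj ∉ F then [pj] else []).map
              (keyOf (vs ++ [v]))).Pairwise Tlt := by
          intro pj; split <;> simp
        rw [List.map_append, List.map_append]
        apply List.pairwise_append.mpr
        refine ⟨List.pairwise_append.mpr ⟨hpw_if pvP0, hpw_if pvP1, ?_⟩, hpw_if pvP2, ?_⟩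
        · intro a ha b hb
          obtain ⟨rfl, hi0, hm0⟩ := hmem_m pvP0 a ha
          obtain ⟨rfl, hi1, hm1⟩ := hmem_m pvP1 b hb
          exact hTlt pvP0 pvP1 hP0 hP1 hm0 hm1 hi0 hi1 (by decide)
        · intro a ha b hb
          obtain ⟨rfl, hi2, hm2⟩ := hmem_m pvP2 b hb
          rcases List.mem_append.mp ha with h | h
          · obtain ⟨rfl, hi0, hm0⟩ := hmem_m pvP0 a h
            exact hTlt pvP0 pvP2 hP0 hP2 hm0 hm2 hi0 hi2 (by decide)
          · obtain ⟨rfl, hi1, hm1⟩ := hmem_m pvP1 a h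
            exact hTlt pvP1 pvP2 hP1 hP2 hm1 hm2 hi1 hi2 (by decide)
      · -- old keys are strictly below the new ones
        intro a ha b hb
        obtain ⟨p, hpF, rfl⟩ := List.mem_map.mp ha
        have hb' : b.1 = (vs.length : Int) := by
          rcases List.mem_map.mp hb with ⟨q, hqE, rfl⟩
          have : (q = pvP0 ∧ PySem.Str.isIn pvP0 v = true ∧ pvP0 ∉ F) ∨
                 (q = pvP1 ∧ PySem.Str.isIn pvP1 v = true ∧ pvP1 ∉ F) ∨
                 (q = pvP2 ∧ PySem.Str.isIn pvP2 v = true ∧ pvP2 ∉ F) := by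
            rcases List.mem_append.mp hqE with h | h
            rcases List.mem_append.mp h with h | h
            all_goals split at h <;> simp_all
          rcases this with ⟨rfl, h1, h2⟩ | ⟨rfl, h1, h2⟩ | ⟨rfl, h1, h2⟩ <;>
            rw [hknew _ (by decide) h2 h1]
        have := hbound p hpF
        unfold Tlt keyOf
        left
        rw [hb']
        exact this
    · -- the hits are a permutation of the keyed accumulator
      have hhit : ∀ (j : Int) (p : String), p ∈ pvPHRASES → pvPrio p = j →
          hitOf (vs ++ [v]) j p = hitOf vs j p ++
            (if PySem.Str.isIn p v = true ∧ p ∉ F then [p] else []).map (keyOf (vs ++ [v])) := by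
        intro j p hP hprio
        by_cases hpF : p ∈ F
        · unfold hitOf
          rw [hstable p hpF]
          simp [hpF]
        · have hn := hnone p hP hpF
          by_cases hin : PySem.Str.isIn p v
          · unfold hitOf
            rw [fIdx_append, hn, Option.none_or, if_pos hin,
              if_pos (⟨hin, hpF⟩ : PySem.Str.isIn p v = true ∧ p ∉ F), List.map_cons,
              List.map_nil, hknew p hP hpF hin, hprio]
            simp
          · unfold hitOf
            rw [fIdx_append, hn, Option.none_or, if_neg hin,
              if_neg (fun h => hin h.1 : ¬(PySem.Str.isIn p v = true ∧ p ∉ F))]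
            simp
      rw [hhit 0 pvP0 hP0 (by decide), hhit 1 pvP1 hP1 (by decide),
          hhit 2 pvP2 hP2 (by decide), hF', aStep2_eq_append, List.map_append, hmapF]
      have hshuffle : ∀ (a x b y c z : List (Int × Int × String)),
          ((a ++ x) ++ (b ++ y) ++ (c ++ z)).Perm (a ++ b ++ c ++ (x ++ y ++ z)) := by
        intros a x b y c z
        rw [← Multiset.coe_eq_coe]
        simp only [← Multiset.coe_add]
        abel
      refine (hshuffle _ _ _ _ _ _).trans ?_
      rw [List.map_append, List.map_append]
      exact ih4.append_right _

-- ===== VERDICT (by name: the statement is the Claim_ definition above) =====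
theorem simulate_intelligent_merge_spec : Claim_equal_simulate_intelligent_merge := by
  intro changes _ hpre
  unfold Spec_simulate_intelligent_merge
  obtain ⟨hne, -⟩ := hpre
  simp only [simulate_intelligent_merge, simulate_intelligent_merge_alt]
  have hlam : (fun change => (PySem.Dict.mk change).getD "value" "") = pvVal := rfl
  rw [hlam]
  set vs := changes.map pvVal with hvs
  have hA : changes.foldl aStep [] = vs.foldl aStep2 [] :=
    foldl_aStep_eq changes [] (by decide)
  obtain ⟨inv1, inv2, inv3, inv4⟩ := main_inv vs
  have hsorted : PySem.List.sorted2 ((PySem.List.enumerate pvPHRASES).foldl (bHitsStep vs) [])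
      (fun t => t.1) (fun t => t.2.1) = (vs.foldl aStep2 []).map (keyOf vs) := by
    rw [bHits_eq]
    exact sorted2_eq_of_perm_of_pairwise _ _ inv4.symm inv3
  rw [hA, hsorted]
  set F := vs.foldl aStep2 [] with hFdef
  have hmap3 : (F.map (keyOf vs)).map (fun t => t.2.2) = F := by
    rw [List.map_map]
    have : ((fun t : Int × Int × String => t.2.2) ∘ keyOf vs) = id := rfl
    rw [this, List.map_id]
  by_cases hF : F = []
  · rw [hF]
    simp only [List.map_nil, ne_eq, not_true_eq_false, if_false]
    obtain ⟨L, b, rfl⟩ : ∃ L b, changes = L ++ [b] := by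
      rcases List.eq_nil_or_concat changes with h' | ⟨L, b, h'⟩
      · exact absurd h' hne
      · exact ⟨L, b, by simpa [List.concat_eq_append] using h'⟩
    have hvs' : vs = L.map pvVal ++ [pvVal b] := by rw [hvs, List.map_append]; rfl
    rw [hvs', PySem.List.pyGet?_neg_one_append_singleton,
      PySem.List.pyGet?_neg_one_append_singleton]
    rfl
  · have hT : F.map (keyOf vs) ≠ [] := by
      intro h
      exact hF (List.map_eq_nil_iff.mp h)
    rw [if_pos hF, if_pos hT, hmap3]
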